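-- pv_equiv track=rewrite | github.com/KimHeeSu1203/algorithm | Hash&Heap/5052.py | find
-- ===== SOURCE A (Python) =====
-- def find(n, d):
--     for i in range(n):
--         for j in range(i+1, n):
--             if len(d[i]) >= len(d[j]):
--                 width = len(d[j])
--                 if (d[j] == d[i][0:width]):
--                     return -1
--                     break
--
--             elif len(d[i]) < len(d[j]):
--                 width = len(d[i])
--                 if (d[i] == d[j][0:width]):
--                     return -1
--                     break
--
--     return 0
-- ===== SOURCE B (Python) =====
-- def find(n, d):
--     # One pass with a hash set: some string is a prefix of another iff the
--     # first n words contain a duplicate or some proper prefix of a word.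
--     # max(0, n) reads n as a count, like range(n) does.
--     words = d[:max(0, n)]
--     seen = set(words)
--     if len(seen) < len(words):
--         return -1
--     for w in words:
--         for k in range(len(w)):
--             if w[:k] in seen:
--                 return -1
--     return 0
-- ===== Notes on version B (the rewrite author's own statement) =====
-- stated objective: alternative
-- what changed: Replaced the all-pairs nested scan by a hash set of the words plus one pass that looks up each word's proper prefixes in the set (duplicates caught by comparing set size with list length).
-- outside the precondition, e.g. on find(5, ['a', 'ab']): A returns -1, B returns -1; on find(2, []): A raises IndexError, B returns 0
import Mathlib
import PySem

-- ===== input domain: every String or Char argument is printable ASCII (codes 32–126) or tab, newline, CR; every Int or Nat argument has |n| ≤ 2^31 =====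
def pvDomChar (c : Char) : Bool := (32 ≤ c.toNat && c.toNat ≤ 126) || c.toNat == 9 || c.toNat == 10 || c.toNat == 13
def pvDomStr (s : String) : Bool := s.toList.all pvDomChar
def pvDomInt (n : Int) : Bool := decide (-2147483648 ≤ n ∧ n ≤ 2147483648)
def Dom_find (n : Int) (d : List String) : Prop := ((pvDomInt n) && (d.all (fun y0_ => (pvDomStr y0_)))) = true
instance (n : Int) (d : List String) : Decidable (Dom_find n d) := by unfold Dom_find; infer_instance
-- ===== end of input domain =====

-- B replaces A's all-pairs nested prefix scan by a set of the words plus a proper-prefix lookup pass; return values proved equal on n ≤ len(d) or n ≤ 1.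


-- ===== PORT A =====
-- inner 'for j in range(i+1, n)' of A as a counter loop, with the early 'return -1' as a Bool result
def findInnerA (d : List String) (i j n : Int) : Bool :=
  if h : j < n then
    let di := (PySem.List.pyGet? d i).getD ""   -- d[i]; in range under Pre_find
    let dj := (PySem.List.pyGet? d j).getD ""   -- d[j]
    if PySem.Str.len di ≥ PySem.Str.len dj then
      -- width = len(d[j]); d[j] == d[i][0:width]
      if dj = PySem.Str.slice di (some 0) (some (PySem.Str.len dj)) then true
      else findInnerA d i (j + 1) n
    else
      -- width = len(d[i]); d[i] == d[j][0:width]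
      if di = PySem.Str.slice dj (some 0) (some (PySem.Str.len di)) then true
      else findInnerA d i (j + 1) n
  else false
termination_by (n - j).toNat
decreasing_by all_goals (simp_wf; omega)

-- outer 'for i in range(n)'
def findOuterA (d : List String) (i n : Int) : Int :=
  if h : i < n then
    if findInnerA d i (i + 1) n then -1
    else findOuterA d (i + 1) n
  else 0
termination_by (n - i).toNat
decreasing_by simp_wf; omega

def find (n : Int) (d : List String) : Int :=
  findOuterA d 0 n

-- ===== PORT B =====
-- inner 'for k in range(len(w)): if w[:k] in seen: return -1'
def prefOneB (seen : PySem.Set String) (w : String) (ks : List Int) : Bool :=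
  match ks with
  | [] => false
  | k :: rest =>
    if PySem.Set.contains seen (PySem.Str.slice w none (some k)) then true
    else prefOneB seen w rest

-- 'for w in words'
def prefLoopB (seen : PySem.Set String) (ws : List String) : Bool :=
  match ws with
  | [] => false
  | w :: rest =>
    if prefOneB seen w (PySem.List.pyRange 0 (PySem.Str.len w) 1) then true
    else prefLoopB seen rest

def find_alt (n : Int) (d : List String) : Int :=
  let words := PySem.List.slice d none (some (max 0 n))
  let seen := PySem.Set.ofList words
  if PySem.Set.len seen < (words.length : Int) then -1
  else if prefLoopB seen words then -1
  else 0

-- ===== PRECONDITION & SPEC =====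
-- Pre_ excludes only n ≥ 2 with n > len(d): there A raises IndexError unless an early prefix
-- pair makes it return -1 first.
def Pre_find (n : Int) (d : List String) : Prop := n ≤ (d.length : Int) ∨ n ≤ 1
instance (n : Int) (d : List String) : Decidable (Pre_find n d) := by unfold Pre_find; infer_instance

def pvWitness_find : Int × List String := (3, ["ab", "cd", "abc"])

def Spec_find (n : Int) (d : List String) (out : Int) : Prop := out = find_alt n d
instance (n : Int) (d : List String) (out : Int) : Decidable (Spec_find n d out) := by unfold Spec_find; infer_instance

-- ===== CLAIM (what is proved, stated in full; the proofs are below) =====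
def Claim_equal_find : Prop := ∀ (n : Int) (d : List String), Dom_find n d → Pre_find n d → Spec_find n d (find n d)

-- ===== LEMMAS AND PROOFS =====
-- the symmetric "one string is a prefix of the other" relation both programs decide
abbrev pvRel (u v : String) : Prop := u.toList <+: v.toList ∨ v.toList <+: u.toList

theorem pvRel_symm {u v : String} (h : pvRel u v) : pvRel v u := h.elim .inr .inl

theorem slice_eq_iff_prefix (u v : String) :
    (v = PySem.Str.slice u (some 0) (some (PySem.Str.len v))) ↔ v.toList <+: u.toList := by
  rw [← String.toList_inj]
  simp [PySem.Str.slice, PySem.List.slice_to (by positivity : (0:Int) ≤ PySem.Str.len v), PySem.Str.len_eq]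
  rw [List.prefix_iff_eq_take, String.length_toList]

theorem branch_iff_rel (u v : String) :
    (if PySem.Str.len u ≥ PySem.Str.len v then
        (v = PySem.Str.slice u (some 0) (some (PySem.Str.len v)) : Prop)
      else (u = PySem.Str.slice v (some 0) (some (PySem.Str.len u)) : Prop)) ↔ pvRel u v := by
  split_ifs with h <;> rw [slice_eq_iff_prefix] <;> unfold pvRel <;>
    simp [PySem.Str.len_eq] at h
  · constructor
    · exact .inr
    · rintro (hp | hp)
      · exact (hp.eq_of_length (le_antisymm hp.length_le h)) ▸ List.prefix_refl _
      · exact hp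
  · constructor
    · exact .inl
    · rintro (hp | hp)
      · exact hp
      · exact absurd hp.length_le (by simpa [String.length_toList] using not_le.mpr h)

theorem if_if_or (c1 P Q : Prop) [Decidable c1] [Decidable P] [Decidable Q] (r : Bool) :
    (if c1 then (if P then true else r) else (if Q then true else r)) =
      (decide (if c1 then P else Q) || r) := by
  split_ifs <;> simp_all

theorem findInnerA_eq_any (d : List String) (i : Int) (k : Nat) :
    ∀ j n : Int, (n - j).toNat = k →
    findInnerA d i j n =
      (PySem.List.pyRange j n 1).any
        (fun j' => decide (pvRel ((PySem.List.pyGet? d i).getD "") ((PySem.List.pyGet? d j').getD ""))) := by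
  induction k with
  | zero =>
    intro j n hk
    rw [PySem.List.pyRange_one_eq_nil (by omega)]
    unfold findInnerA
    rw [dif_neg (by omega)]
    rfl
  | succ k ih =>
    intro j n hk
    have hj : j < n := by omega
    rw [PySem.List.pyRange_one_cons hj, List.any_cons]
    unfold findInnerA
    rw [dif_pos hj]
    simp only [← ih (j + 1) n (by omega)]
    rw [if_if_or, decide_eq_decide.mpr (branch_iff_rel _ _)]

theorem any_pyRange_getD_aux (d : List String) (p : String → Bool) (k : Nat) :
    ∀ (a n : Int), (n - a).toNat = k → 0 ≤ a → n ≤ (d.length : Int) →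
    (PySem.List.pyRange a n 1).any (fun j => p ((PySem.List.pyGet? d j).getD "")) =
      ((d.take n.toNat).drop a.toNat).any p := by
  induction k with
  | zero =>
    intro a n hk h0 hn
    rw [PySem.List.pyRange_one_eq_nil (by omega)]
    have : (d.take n.toNat).length ≤ a.toNat := by
      simp [List.length_take]; omega
    rw [List.drop_eq_nil_of_le this]
    rfl
  | succ k ih =>
    intro a n hk h0 hn
    have ha : a < n := by omega
    have halen : a.toNat < (d.take n.toNat).length := by
      simp [List.length_take]; omega
    rw [PySem.List.pyRange_one_cons ha, List.any_cons,
        List.drop_eq_getElem_cons halen, List.any_cons,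
        List.getElem_take]
    have hget : PySem.List.pyGet? d a = some d[a.toNat] := by
      rw [PySem.List.pyGet?_of_nonneg d h0, List.getElem?_eq_getElem (by omega)]
    rw [hget]
    have : a.toNat + 1 = (a + 1).toNat := by omega
    rw [this, ih (a+1) n (by omega) (by omega) hn]
    rfl

def pvScan : List String → Bool
  | [] => false
  | w :: ws => (ws.any fun v => decide (pvRel w v)) || pvScan ws

theorem pvScan_eq_false_iff (ws : List String) :
    pvScan ws = false ↔ ws.Pairwise (fun u v => ¬ pvRel u v) := by
  induction ws with
  | nil => simp [pvScan]
  | cons w ws ih => simp [pvScan, List.pairwise_cons, ih, List.any_eq_false]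

theorem if_or_aux (x y : Bool) :
    (if x = true then (-1 : Int) else if y = true then -1 else 0) =
      if (x || y) = true then -1 else 0 := by
  cases x <;> cases y <;> simp

theorem findOuterA_eq_aux (d : List String) (n : Int) (hn : n ≤ (d.length : Int)) (k : Nat) :
    ∀ (a : Int), (n - a).toNat = k → 0 ≤ a →
    findOuterA d a n =
      if pvScan ((d.take n.toNat).drop a.toNat) then -1 else 0 := by
  induction k with
  | zero =>
    intro a hk h0
    rw [List.drop_eq_nil_of_le (by simp [List.length_take]; omega)]
    unfold findOuterA
    rw [dif_neg (by omega)]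
    rfl
  | succ k ih =>
    intro a hk h0
    have ha : a < n := by omega
    have halen : a.toNat < (d.take n.toNat).length := by
      simp [List.length_take]; omega
    unfold findOuterA
    rw [dif_pos ha,
        findInnerA_eq_any d a (n - (a + 1)).toNat (a + 1) n rfl,
        any_pyRange_getD_aux d (fun s => decide (pvRel ((PySem.List.pyGet? d a).getD "") s)) (n - (a+1)).toNat (a+1) n rfl (by omega) hn,
        List.drop_eq_getElem_cons halen, List.getElem_take]
    have hget : (PySem.List.pyGet? d a).getD "" = d[a.toNat] := by
      rw [PySem.List.pyGet?_of_nonneg d h0, List.getElem?_eq_getElem (by omega)]; rfl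
    have hsucc : a.toNat + 1 = (a + 1).toNat := by omega
    rw [ih (a+1) (by omega) (by omega), hget, hsucc]
    show _ = (if pvScan (d[a.toNat] :: (d.take n.toNat).drop (a+1).toNat) then _ else _)
    simp only [pvScan]
    exact if_or_aux _ _

theorem prefOneB_eq_any (seen : PySem.Set String) (w : String) (ks : List Int) :
    prefOneB seen w ks = ks.any (fun k => PySem.Set.contains seen (PySem.Str.slice w none (some k))) := by
  induction ks with
  | nil => rfl
  | cons k rest ih => simp only [prefOneB, List.any_cons, ← ih]; split_ifs <;> simp_all

theorem prefLoopB_eq_any (seen : PySem.Set String) (ws : List String) :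
    prefLoopB seen ws =
      ws.any (fun w => (PySem.List.pyRange 0 (PySem.Str.len w) 1).any
        (fun k => PySem.Set.contains seen (PySem.Str.slice w none (some k)))) := by
  induction ws with
  | nil => rfl
  | cons w rest ih =>
    simp only [prefLoopB, List.any_cons, ← ih, prefOneB_eq_any]
    split_ifs <;> simp_all

theorem foldl_add_decomp {α : Type} [BEq α] [LawfulBEq α] (xs : List α) :
    ∀ s : List α, ∃ t, xs.foldl PySem.Set.add s = s ++ t ∧ t.Sublist xs := by
  induction xs with
  | nil => exact fun s => ⟨[], by simp⟩
  | cons x xs ih =>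
    intro s
    rw [List.foldl_cons, PySem.Set.add_eq_ite]
    by_cases hx : x ∈ s
    · obtain ⟨t, ht, hs⟩ := ih s
      exact ⟨t, by simp [hx, ht], hs.cons _⟩
    · obtain ⟨t, ht, hs⟩ := ih (s ++ [x])
      exact ⟨x :: t, by simp [hx, ht], hs.cons₂ _⟩

theorem ofList_sublist {α : Type} [BEq α] [LawfulBEq α] (xs : List α) :
    (PySem.Set.ofList xs).Sublist xs := by
  obtain ⟨t, ht, hs⟩ := foldl_add_decomp xs []
  rw [PySem.Set.ofList_eq_foldl, ht]; simpa using hs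

theorem len_ofList_lt_iff {α : Type} [BEq α] [LawfulBEq α] (xs : List α) :
    ((PySem.Set.ofList xs).length < xs.length) ↔ ¬ xs.Nodup := by
  constructor
  · intro hlt hnd
    have hperm : (PySem.Set.ofList xs).Perm xs :=
      (List.perm_ext_iff_of_nodup (PySem.Set.nodup_ofList xs) hnd).mpr
        (fun a => PySem.Set.mem_ofList xs a)
    exact absurd hperm.length_eq (by omega)
  · intro hnd
    have hle := (ofList_sublist xs).length_le
    rcases lt_or_eq_of_le hle with h | h
    · exact h
    · exact absurd ((ofList_sublist xs).eq_of_length h ▸ PySem.Set.nodup_ofList xs) hnd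

theorem pair_iff (ws : List String) :
    (¬ ws.Pairwise (fun u v => ¬ pvRel u v)) ↔
      (¬ ws.Nodup ∨ ∃ w ∈ ws, ∃ k : Nat, k < w.toList.length ∧ String.ofList (w.toList.take k) ∈ ws) := by
  constructor
  · intro h
    rw [List.pairwise_iff_getElem] at h
    push Not at h
    obtain ⟨i, j, hi, hj, hij, hr⟩ := h
    by_cases heq : ws[i] = ws[j]
    · left
      intro hnd
      exact absurd heq (List.pairwise_iff_getElem.mp hnd i j hi hj hij)
    · right
      have key : ∀ u v : String, u ∈ ws → v ∈ ws → u ≠ v → u.toList <+: v.toList →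
          ∃ w ∈ ws, ∃ k : Nat, k < w.toList.length ∧ String.ofList (w.toList.take k) ∈ ws := by
        intro u v hu hv hne hp
        refine ⟨v, hv, u.toList.length, ?_, ?_⟩
        · rcases lt_or_eq_of_le hp.length_le with h | h
          · exact h
          · exact absurd (String.toList_inj.mp (hp.eq_of_length h)) hne
        · rw [← List.prefix_iff_eq_take.mp hp]
          simpa [String.ofList_toList] using hu
      rcases hr with hp | hp
      · exact key _ _ (List.getElem_mem hi) (List.getElem_mem hj) heq hp
      · exact key _ _ (List.getElem_mem hj) (List.getElem_mem hi) (Ne.symm heq) hp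
  · rintro (hnd | ⟨w, hw, k, hk, hmem⟩) h
    · refine hnd (h.imp ?_)
      intro u v hnr heq
      exact hnr (heq ▸ Or.inl (List.prefix_refl _))
    · have hne : String.ofList (w.toList.take k) ≠ w := by
        intro he
        have : (String.ofList (w.toList.take k)).toList.length = w.toList.length := by rw [he]
        simp only [String.toList_ofList, List.length_take] at this
        omega
      have := h.forall (fun u v (hr : ¬ pvRel u v) (hr2 : pvRel v u) => hr (pvRel_symm hr2)) hmem hw hne
      exact this (.inl (by simp [String.toList_ofList, List.take_prefix]))

theorem find_alt_eq (n : Int) (d : List String) :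
    find_alt n d = if pvScan (d.take n.toNat) then -1 else 0 := by
  unfold find_alt
  rw [PySem.List.slice_to d (le_max_left 0 n),
      show (max 0 n).toNat = n.toNat by omega]
  set W := d.take n.toNat with hW
  have hc1 : (PySem.Set.len (PySem.Set.ofList W) < (W.length : Int)) ↔ ¬ W.Nodup := by
    rw [← len_ofList_lt_iff]
    simp [PySem.Set.len]
  have hc2 : (prefLoopB (PySem.Set.ofList W) W = true) ↔
      (∃ w ∈ W, ∃ k : Nat, k < w.toList.length ∧ String.ofList (w.toList.take k) ∈ W) := by
    rw [prefLoopB_eq_any]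
    simp only [List.any_eq_true, PySem.List.mem_pyRange_one, PySem.Set.contains,
      List.contains_iff_mem, PySem.Set.mem_ofList, PySem.Str.len_eq, PySem.Str.slice]
    constructor
    · rintro ⟨w, hw, j, ⟨hj0, hjlt⟩, hmem⟩
      refine ⟨w, hw, j.toNat, by omega, ?_⟩
      rwa [show PySem.Chars.slice w.toList none (some j) = List.take j.toNat w.toList from PySem.List.slice_to _ hj0] at hmem
    · rintro ⟨w, hw, k, hk, hmem⟩
      refine ⟨w, hw, (k : Int), ⟨by omega, by omega⟩, ?_⟩
      rw [show PySem.Chars.slice w.toList none (some (k:Int)) = List.take (k:Int).toNat w.toList from PySem.List.slice_to _ (by omega)]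
      simpa using hmem
  have hscan : (pvScan W = true) ↔ ¬ W.Pairwise (fun u v => ¬ pvRel u v) := by
    rw [← pvScan_eq_false_iff]; simp
  by_cases h1 : W.Nodup
  · by_cases h2 : prefLoopB (PySem.Set.ofList W) W = true
    · rw [if_neg (by rw [hc1]; exact not_not.mpr h1), if_pos h2,
          if_pos (hscan.mpr ((pair_iff W).mpr (Or.inr (hc2.mp h2))))]
    · rw [if_neg (by rw [hc1]; exact not_not.mpr h1), if_neg h2, if_neg]
      simp only [Bool.not_eq_true]
      rw [pvScan_eq_false_iff]
      by_contra hp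
      rcases (pair_iff W).mp hp with hnd | hex
      · exact hnd h1
      · exact h2 (hc2.mpr hex)
  · rw [if_pos (hc1.mpr h1), if_pos (hscan.mpr ((pair_iff W).mpr (Or.inl h1)))]

-- ===== VERDICT (by name: the statement is the Claim_ definition above) =====
theorem find_spec : Claim_equal_find := by
  intro n d _ hpre
  unfold Spec_find
  rw [find_alt_eq n d]
  by_cases h0 : 0 ≤ n
  · rcases hpre with hn | h1
    · unfold find
      rw [findOuterA_eq_aux d n hn (n - 0).toNat 0 rfl le_rfl]
      simp
    · rcases (by omega : n = 0 ∨ n = 1) with rfl | rfl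
      · unfold find findOuterA
        rw [dif_neg (by omega)]
        rfl
      · by_cases hd : 1 ≤ (d.length : Int)
        · unfold find
          rw [findOuterA_eq_aux d 1 hd 1 0 (by norm_num) le_rfl]
          simp
        · have : d = [] := by
            cases d with | nil => rfl | cons a t => exact absurd (by simp) hd
          subst this
          unfold find findOuterA
          rw [dif_pos (by omega : (0:Int) < 1)]
          unfold findInnerA
          norm_num
          unfold findOuterA
          rw [dif_neg (by omega : ¬ (1:Int) < 1)]
          simp [pvScan]
  · unfold find findOuterA
    rw [dif_neg (by omega), show n.toNat = 0 by omega]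
    rfl
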